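-- pv_equiv track=rewrite | github.com/lofaldli/advent-of-code | 2020/day10.py | count_smart
-- ===== SOURCE A (Python) =====
-- from collections import Counter
--
-- def count_smart(jumps):
--     streak_counts = Counter()
--     streak = 0
--     for j in jumps:
--         if j == 1:
--             streak += 1
--         elif j == 3:
--             streak_counts[streak] += 1
--             streak = 0
--     return 2**streak_counts[2] * 4**streak_counts[3] * 7**streak_counts[4]
-- ===== SOURCE B (Python) =====
-- def count_smart(jumps):
--     if 3 not in jumps:
--         return 1
--     i = jumps.index(3)
--     ones = jumps[:i].count(1)
--     return {2: 2, 3: 4, 4: 7}.get(ones, 1) * count_smart(jumps[i + 1:])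
-- ===== Notes on version B (the rewrite author's own statement) =====
-- stated objective: alternative
-- what changed: B replaces A's single-pass Counter-tallying loop with exponentiation at the end by a recursive divide-and-conquer: split the list at the first 3, count the 1s in the prefix, multiply that streak's factor, and recurse on the remainder (trailing part with no 3 contributes factor 1).
import Mathlib
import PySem

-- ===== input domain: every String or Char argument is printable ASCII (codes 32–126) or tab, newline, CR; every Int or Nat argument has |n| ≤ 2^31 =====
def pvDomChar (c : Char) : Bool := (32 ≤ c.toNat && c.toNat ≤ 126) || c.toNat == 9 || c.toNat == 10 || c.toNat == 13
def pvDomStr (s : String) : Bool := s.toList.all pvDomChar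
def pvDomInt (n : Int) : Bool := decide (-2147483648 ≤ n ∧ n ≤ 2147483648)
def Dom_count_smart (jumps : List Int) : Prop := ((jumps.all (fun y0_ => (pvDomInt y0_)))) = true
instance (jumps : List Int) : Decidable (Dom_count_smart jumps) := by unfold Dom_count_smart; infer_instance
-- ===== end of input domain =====

-- B replaces A's single-pass Counter scan by a recursive divide-at-the-first-3 decomposition; objective: alternative.

-- ===== PORT A =====
-- loop body of A: state = (streak_counts, streak); Counter[k] += 1 is Dict.modify k 0 (· + 1)
def pvStepA (s : PySem.Dict Int Int × Int) (j : Int) : PySem.Dict Int Int × Int :=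
  if j = 1 then (s.1, s.2 + 1)
  else if j = 3 then (s.1.modify s.2 0 (· + 1), 0)
  else s

def count_smart (jumps : List Int) : Int :=
  let st := jumps.foldl pvStepA (PySem.Dict.empty, 0)
  -- counts are nonnegative, so Python's 2**c is 2 ^ c.toNat here
  2 ^ (st.1.getD 2 0).toNat * 4 ^ (st.1.getD 3 0).toNat * 7 ^ (st.1.getD 4 0).toNat

-- ===== PORT B =====
-- {2: 2, 3: 4, 4: 7}.get(ones, 1)
def pvFactor (s : Int) : Int :=
  if s = 2 then 2 else if s = 3 then 4 else if s = 4 then 7 else 1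

-- B: if 3 not in jumps return 1; else split at the first 3 and recurse on the tail
def count_smart_alt (jumps : List Int) : Int :=
  if (3 : Int) ∈ jumps then
    match hi : PySem.List.index? jumps 3 with
    | some i =>
        let ones := PySem.List.count (PySem.List.slice jumps none (some (i : Int))) 1
        pvFactor (ones : Int) * count_smart_alt (PySem.List.slice jumps (some ((i : Int) + 1)) none)
    | none => 1
  else 1
termination_by jumps.length
decreasing_by
  have hcast : ((i : Int) + 1) = (((i + 1 : Nat) : Int)) := by omega
  rw [hcast, PySem.List.slice_from_natCast]
  obtain ⟨hk, _, _⟩ := PySem.List.getElem_of_index?_eq_some hi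
  simp [List.length_drop]
  omega

-- ===== PRECONDITION & SPEC =====
def Spec_count_smart (jumps : List Int) (out : Int) : Prop := out = count_smart_alt jumps
instance (jumps : List Int) (out : Int) : Decidable (Spec_count_smart jumps out) := by unfold Spec_count_smart; infer_instance

-- ===== CLAIM =====
def Claim_equal_count_smart : Prop := ∀ (jumps : List Int), Dom_count_smart jumps → Spec_count_smart jumps (count_smart jumps)

-- ===== LEMMAS AND PROOFS =====

-- common reference function: product of factors of the 1-streaks closed by a 3, pending streak s
def pvF (s : Int) : List Int → Int
  | [] => 1
  | j :: t => if j = 1 then pvF (s + 1) t else if j = 3 then pvFactor s * pvF 0 t else pvF s t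

-- A's final combination of a counter dict
def pvVal (d : PySem.Dict Int Int) : Int :=
  2 ^ (d.getD 2 0).toNat * 4 ^ (d.getD 3 0).toNat * 7 ^ (d.getD 4 0).toNat

lemma pvVal_modify (d : PySem.Dict Int Int) (s : Int) (h : ∀ k, 0 ≤ d.getD k 0) :
    pvVal (d.modify s 0 (· + 1)) = pvVal d * pvFactor s := by
  have h2 := h 2; have h3 := h 3; have h4 := h 4
  unfold pvVal pvFactor
  simp only [PySem.Dict.getD_modify]
  by_cases hs2 : s = 2
  · subst hs2
    norm_num
    rw [show ((d.getD 2 0) + 1).toNat = (d.getD 2 0).toNat + 1 by omega, pow_succ]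
    ring
  · by_cases hs3 : s = 3
    · subst hs3
      norm_num
      rw [show ((d.getD 3 0) + 1).toNat = (d.getD 3 0).toNat + 1 by omega, pow_succ]
      ring
    · by_cases hs4 : s = 4
      · subst hs4
        norm_num
        rw [show ((d.getD 4 0) + 1).toNat = (d.getD 4 0).toNat + 1 by omega, pow_succ]
        ring
      · rw [if_neg (fun h => hs2 h.symm), if_neg (fun h => hs3 h.symm),
            if_neg (fun h => hs4 h.symm), if_neg hs2, if_neg hs3, if_neg hs4]
        ring

lemma pvNonneg_modify (d : PySem.Dict Int Int) (s : Int) (h : ∀ k, 0 ≤ d.getD k 0) :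
    ∀ k, 0 ≤ (d.modify s 0 (· + 1)).getD k 0 := by
  intro k
  rw [PySem.Dict.getD_modify]
  split_ifs
  · have := h s; omega
  · exact h k

-- A's fold computes pvVal d times the streak product pvF s l
lemma pvFoldA_eq (l : List Int) : ∀ (d : PySem.Dict Int Int) (s : Int),
    (∀ k, 0 ≤ d.getD k 0) →
    pvVal (l.foldl pvStepA (d, s)).1 = pvVal d * pvF s l := by
  induction l with
  | nil => intro d s _; simp [pvF]
  | cons j t ih =>
    intro d s h
    simp only [List.foldl_cons, pvF]
    by_cases h1 : j = 1
    · rw [show pvStepA (d, s) j = (d, s + 1) from by simp [pvStepA, h1], if_pos h1]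
      exact ih d (s + 1) h
    · by_cases h3 : j = 3
      · rw [show pvStepA (d, s) j = (d.modify s 0 (· + 1), 0) from by simp [pvStepA, h3],
            if_neg h1, if_pos h3, ih _ 0 (pvNonneg_modify d s h), pvVal_modify d s h]
        ring
      · rw [show pvStepA (d, s) j = (d, s) from by simp [pvStepA, h1, h3],
            if_neg h1, if_neg h3]
        exact ih d s h

lemma pvF_no3 (l : List Int) (hl : (3 : Int) ∉ l) : ∀ s, pvF s l = 1 := by
  induction l with
  | nil => intro s; simp [pvF]
  | cons j t ih =>
    intro s
    have hj : j ≠ 3 := fun h => hl (h ▸ List.mem_cons_self ..)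
    have ht : (3 : Int) ∉ t := fun h => hl (List.mem_cons_of_mem _ h)
    simp only [pvF, if_neg hj]
    split_ifs
    · exact ih ht _
    · exact ih ht _

lemma pvF_split (pre suf : List Int) (hpre : (3 : Int) ∉ pre) : ∀ s,
    pvF s (pre ++ 3 :: suf) = pvFactor (s + (pre.count 1 : Int)) * pvF 0 suf := by
  induction pre with
  | nil => intro s; simp [pvF]
  | cons j p ih =>
    intro s
    have hj : j ≠ 3 := fun h => hpre (h ▸ List.mem_cons_self ..)
    have hp : (3 : Int) ∉ p := fun h => hpre (List.mem_cons_of_mem _ h)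
    by_cases h1 : j = 1
    · simp only [List.cons_append, pvF, ih hp (s + 1), h1, List.count_cons_self]
      have harith : s + 1 + (List.count 1 p : Int) = s + ((List.count 1 p + 1 : Nat) : Int) := by
        push_cast; ring
      rw [harith]
      simp
    · have hc : List.count 1 (j :: p) = List.count 1 p := by
        simp [h1]
      simp only [List.cons_append, pvF, if_neg h1, if_neg hj, ih hp s, hc]

-- B computes the streak product pvF 0
lemma pvB_eq (jumps : List Int) : count_smart_alt jumps = pvF 0 jumps := by
  induction hn : jumps.length using Nat.strong_induction_on generalizing jumps with
  | _ n ih =>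
  subst hn
  rw [count_smart_alt]
  by_cases hmem : (3 : Int) ∈ jumps
  · rw [if_pos hmem]
    split
    next i hi =>
      obtain ⟨pre, suf, hsplit, hlen, hnot⟩ := (PySem.List.index?_eq_some_iff jumps 3 i).mp hi
      have hcast : ((i : Int) + 1) = (((i + 1 : Nat) : Int)) := by omega
      have hslice1 : PySem.List.slice jumps none (some (i : Int)) = pre := by
        rw [hsplit, PySem.List.slice_to_natCast, ← hlen, List.take_left]
      have hslice2 : PySem.List.slice jumps (some ((i : Int) + 1)) none = suf := by
        rw [hcast, PySem.List.slice_from_natCast, hsplit, ← hlen]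
        rw [show pre ++ 3 :: suf = (pre ++ [(3 : Int)]) ++ suf by simp,
            show pre.length + 1 = (pre ++ [(3 : Int)]).length by simp]
        exact List.drop_left
      have hlt : suf.length < jumps.length := by
        rw [hsplit]; simp; omega
      show pvFactor ((PySem.List.count (PySem.List.slice jumps none (some (i : Int))) 1 : Nat) : Int)
            * count_smart_alt (PySem.List.slice jumps (some ((i : Int) + 1)) none) = pvF 0 jumps
      rw [hslice1, hslice2, ih suf.length hlt suf rfl, hsplit,
          pvF_split pre suf hnot 0, PySem.List.count_eq, zero_add]
    next hi =>
      exact absurd hmem ((PySem.List.index?_eq_none_iff jumps 3).mp hi)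
  · rw [if_neg hmem, pvF_no3 jumps hmem 0]

-- ===== VERDICT =====
theorem count_smart_spec : Claim_equal_count_smart := by
  intro jumps _
  unfold Spec_count_smart count_smart
  have h0 : ∀ k, 0 ≤ (PySem.Dict.empty : PySem.Dict Int Int).getD k 0 := by
    intro k; simp [PySem.Dict.getD_empty]
  have := pvFoldA_eq jumps PySem.Dict.empty 0 h0
  have hval : pvVal (PySem.Dict.empty : PySem.Dict Int Int) = 1 := by
    unfold pvVal; simp [PySem.Dict.getD_empty]
  rw [pvB_eq]
  calc pvVal (jumps.foldl pvStepA (PySem.Dict.empty, 0)).1 = _ := this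
    _ = pvF 0 jumps := by rw [hval, one_mul]
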